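-- pv_equiv track=rewrite | github.com/mstise/TextAnalyzer | Metromap_generation/Create_timeline_alt.py | importance_rank_ents
-- ===== SOURCE A (Python) =====
-- def importance_rank_ents(cluster2allents):
--     allents = []
--     for ents in cluster2allents.values():
--         allents.extend(ents)
--     from collections import Counter
--     c = Counter(allents)
--     ranked_ents = sorted(list(c.keys()), key=lambda x: c[x], reverse=True)
--     return ranked_ents
-- ===== SOURCE B (Python) =====
-- def importance_rank_ents(cluster2allents):
--     allents = [e for ents in cluster2allents.values() for e in ents]
--     count = {}
--     for e in allents:
--         count[e] = count.get(e, 0) + 1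
--     if not count:
--         return []
--     maxc = max(count.values())
--     buckets = {}
--     for e in count:
--         buckets.setdefault(count[e], []).append(e)
--     out = []
--     for v in range(maxc, 0, -1):
--         out.extend(buckets.get(v, []))
--     return out
-- ===== Notes on version B (the rewrite author's own statement) =====
-- stated objective: alternative
-- what changed: Replaces the comparison sort of distinct entities keyed by frequency with a counting/bucket sort: one pass builds a frequency dict (whose insertion order is the first-appearance order), each distinct entity is appended to the bucket of its count, and buckets are emitted from the maximum count down to 1, which reproduces the stable descending sort exactly.
import Mathlib
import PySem

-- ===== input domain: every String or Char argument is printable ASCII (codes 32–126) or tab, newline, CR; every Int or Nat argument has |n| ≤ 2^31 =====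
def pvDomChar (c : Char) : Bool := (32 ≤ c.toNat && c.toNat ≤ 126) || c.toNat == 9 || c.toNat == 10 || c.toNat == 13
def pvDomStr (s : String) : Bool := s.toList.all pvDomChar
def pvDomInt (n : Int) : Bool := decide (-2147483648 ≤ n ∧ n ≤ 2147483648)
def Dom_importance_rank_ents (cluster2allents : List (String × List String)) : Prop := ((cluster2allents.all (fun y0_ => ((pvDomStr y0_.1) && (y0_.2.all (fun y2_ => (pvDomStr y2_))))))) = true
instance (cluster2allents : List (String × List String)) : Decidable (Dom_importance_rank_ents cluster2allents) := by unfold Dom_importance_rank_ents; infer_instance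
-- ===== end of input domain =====

-- B replaces A's comparison sort keyed by frequency with a counting/bucket sort
-- (buckets per count, emitted from the maximum count down to 1); alternative
-- algorithm of similar cost, no speed claim.

-- ===== PORT A =====
def importance_rank_ents (cluster2allents : List (String × List String)) : List String :=
  -- allents = []; for ents in cluster2allents.values(): allents.extend(ents)
  let allents := (PySem.Dict.ofList cluster2allents).values.foldl (fun acc ents => acc ++ ents) []
  -- c = Counter(allents)
  let c := PySem.Dict.counter allents
  -- sorted(list(c.keys()), key=lambda x: c[x], reverse=True)
  PySem.List.sorted c.keys (fun x => c.getD x 0) true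

-- ===== PORT B =====
def importance_rank_ents_alt (cluster2allents : List (String × List String)) : List String :=
  -- allents = [e for ents in cluster2allents.values() for e in ents]
  let allents := (PySem.Dict.ofList cluster2allents).values.flatMap (fun ents => ents)
  -- count = {}; for e in allents: count[e] = count.get(e, 0) + 1
  let count := allents.foldl (fun d e => d.insert e (d.getD e 0 + 1)) PySem.Dict.empty
  -- if not count: return []
  if count.keys = [] then []
  else
    -- maxc = max(count.values())
    let maxc := PySem.List.maxD count.values (fun x => x) 0
    -- buckets = {}; for e in count: buckets.setdefault(count[e], []).append(e)
    let buckets := count.keys.foldl (fun b e => b.modify (count.getD e 0) [] (fun l => l ++ [e])) PySem.Dict.empty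
    -- out = []; for v in range(maxc, 0, -1): out.extend(buckets.get(v, []))
    (PySem.List.pyRange maxc 0 (-1)).foldl (fun out v => out ++ buckets.getD v []) []

-- ===== PRECONDITION & SPEC =====
def Spec_importance_rank_ents (cluster2allents : List (String × List String)) (out : List String) : Prop := out = importance_rank_ents_alt cluster2allents
instance (cluster2allents : List (String × List String)) (out : List String) : Decidable (Spec_importance_rank_ents cluster2allents out) := by unfold Spec_importance_rank_ents; infer_instance

-- ===== CLAIM (what is proved, stated in full; the proofs are below) =====
def Claim_equal_importance_rank_ents : Prop := ∀ (cluster2allents : List (String × List String)), Dom_importance_rank_ents cluster2allents → Spec_importance_rank_ents cluster2allents (importance_rank_ents cluster2allents)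

-- ===== LEMMAS AND PROOFS =====

-- insertBy walks past a prefix it is not inserted before
lemma insertBy_append_of_skip {α : Type} (before : α → α → Bool) (x : α) (blk rest : List α)
    (h : ∀ y ∈ blk, before x y = false) :
    PySem.List.insertBy before x (blk ++ rest) = blk ++ PySem.List.insertBy before x rest := by
  induction blk with
  | nil => simp
  | cons y t ih =>
    have hy : before x y = false := h y (by simp)
    simp [PySem.List.insertBy, hy, ih (fun z hz => h z (by simp [hz]))]

-- inserting x into a concatenation of key-homogeneous blocks with strictly
-- descending key values appends x to the end of its own block
lemma insertBy_flatMap {α : Type} (key : α → Int) (x : α) (F : Int → List α)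
    (hF : ∀ v, ∀ y ∈ F v, key y = v) :
    ∀ (vs : List Int), vs.Pairwise (· > ·) → key x ∈ vs →
    PySem.List.insertBy (fun a b => decide (key b < key a)) x (vs.flatMap F) =
      vs.flatMap (fun v => F v ++ if key x = v then [x] else []) := by
  intro vs
  induction vs with
  | nil => simp
  | cons v vs ih =>
    intro hp hm
    have hlt : ∀ w ∈ vs, w < v := (List.pairwise_cons.mp hp).1
    by_cases hxv : key x = v
    · subst hxv
      have hskip : ∀ y ∈ F (key x), (fun a b => decide (key b < key a)) x y = false := by
        intro y hy; simp [hF (key x) y hy]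
      rw [List.flatMap_cons, insertBy_append_of_skip _ _ _ _ hskip]
      have hrest : PySem.List.insertBy (fun a b => decide (key b < key a)) x (vs.flatMap F)
          = x :: vs.flatMap F := by
        cases hr : vs.flatMap F with
        | nil => simp [PySem.List.insertBy]
        | cons z zs =>
          have hz : z ∈ vs.flatMap F := by rw [hr]; simp
          obtain ⟨w, hw, hzw⟩ := List.mem_flatMap.mp hz
          have : key z < key x := by rw [hF w z hzw]; exact hlt w hw
          simp [PySem.List.insertBy, this]
      rw [hrest]
      have hres : vs.flatMap (fun w => F w ++ if key x = w then [x] else []) = vs.flatMap F := by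
        apply List.flatMap_congr
        intro w hw
        have : key x ≠ w := by have := hlt w hw; omega
        simp [this]
      rw [List.flatMap_cons, if_pos rfl, hres]
      simp
    · have hm' : key x ∈ vs := by
        rcases List.mem_cons.mp hm with h | h
        · exact absurd h hxv
        · exact h
      have hxlt : key x < v := hlt _ hm'
      have hskip : ∀ y ∈ F v, (fun a b => decide (key b < key a)) x y = false := by
        intro y hy
        have := hF v y hy
        simp only [decide_eq_false_iff_not, not_lt]
        omega
      rw [List.flatMap_cons, insertBy_append_of_skip _ _ _ _ hskip,
        ih (List.pairwise_cons.mp hp).2 hm', List.flatMap_cons, if_neg hxv]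
      simp

-- a stable descending sort is the concatenation, over strictly descending key
-- values covering all elements, of the per-value filters in original order
lemma sorted_rev_eq_flatMap {α : Type} (key : α → Int) (xs : List α) (vs : List Int)
    (hp : vs.Pairwise (· > ·)) (hcov : ∀ e ∈ xs, key e ∈ vs) :
    PySem.List.sorted xs key true = vs.flatMap (fun v => xs.filter (fun e => key e == v)) := by
  induction xs using List.reverseRecOn with
  | nil => simp [PySem.List.sorted]
  | append_singleton ys x ih =>
    have hys : ∀ e ∈ ys, key e ∈ vs := fun e he => hcov e (by simp [he])
    have hx : key x ∈ vs := hcov x (by simp)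
    have hstep : PySem.List.sorted (ys ++ [x]) key true
        = PySem.List.insertBy (fun a b => decide (key b < key a)) x (PySem.List.sorted ys key true) := by
      rw [PySem.List.sorted_rev_eq_foldl_insertBy, PySem.List.sorted_rev_eq_foldl_insertBy,
        List.foldl_append, List.foldl_cons, List.foldl_nil]
    rw [hstep, ih hys,
      insertBy_flatMap key x _ (fun v y hy => by simpa using (List.mem_filter.mp hy).2) vs hp hx]
    apply List.flatMap_congr
    intro v _
    simp only [List.filter_append, List.filter_cons, List.filter_nil]
    by_cases h : key x = v <;> simp [h]

-- range(m, 0, -1) is [m, m-1, …, 1]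
lemma pyRange_neg_one (m : Int) :
    PySem.List.pyRange m 0 (-1) = (List.range m.toNat).map (fun k : Nat => m - (k : Int)) := by
  unfold PySem.List.pyRange
  norm_num
  by_cases hm : 0 < m
  · rw [if_pos hm]
    apply List.map_congr_left
    intro k _
    ring
  · rw [if_neg hm]
    have hm0 : m.toNat = 0 := by omega
    simp [hm0]

lemma mem_pyRange_neg_one {m x : Int} : x ∈ PySem.List.pyRange m 0 (-1) ↔ 0 < x ∧ x ≤ m := by
  rw [pyRange_neg_one]
  simp only [List.mem_map, List.mem_range]
  constructor
  · rintro ⟨k, hk, rfl⟩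
    omega
  · rintro ⟨h1, h2⟩
    exact ⟨(m - x).toNat, by omega, by omega⟩

lemma pairwise_pyRange_neg_one (m : Int) : (PySem.List.pyRange m 0 (-1)).Pairwise (· > ·) := by
  rw [pyRange_neg_one, List.pairwise_map]
  exact List.Pairwise.imp (fun h => by omega) List.pairwise_lt_range

-- max(xs) bounds every element of a nonempty xs
lemma le_maxD_self {xs : List Int} (h : xs ≠ []) :
    ∀ y ∈ xs, y ≤ PySem.List.maxD xs (fun x => x) 0 := by
  intro y hy
  cases hx : PySem.List.max? xs (fun x => x) with
  | none => exact absurd ((PySem.List.max?_eq_none_iff xs _).mp hx) h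
  | some m =>
    have := PySem.List.max?_isMax hx y hy
    simpa [PySem.List.maxD, hx] using this

-- ===== VERDICT (by name: the statement is the Claim_ definition above) =====
theorem importance_rank_ents_spec : Claim_equal_importance_rank_ents := by
  intro c2 _hdom
  unfold Spec_importance_rank_ents importance_rank_ents importance_rank_ents_alt
  dsimp only
  rw [PySem.List.foldl_append_eq_flatMap, PySem.Dict.foldl_insert_getD_add_one_eq_counter]
  simp only [List.nil_append]
  set L := (PySem.Dict.ofList c2).values.flatMap (fun ents => ents) with hLdef
  rw [PySem.Dict.keys_counter]
  set K := PySem.Set.ofList L with hKdef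
  have hkey : (fun x => (PySem.Dict.counter L).getD x 0) = fun x => (List.count x L : Int) :=
    funext (PySem.Dict.getD_counter L)
  by_cases hK : K = []
  · have hL : L = [] := by
      rw [List.eq_nil_iff_forall_not_mem]
      intro x hx
      have : x ∈ K := (PySem.Set.mem_ofList L x).mpr hx
      simp [hK] at this
    simp [hK, hL, PySem.List.sorted]
  · rw [if_neg hK]
    have hvals : (PySem.Dict.counter L).values = K.map (fun k => (List.count k L : Int)) := by
      rw [PySem.Dict.values_eq_map_keys _ (PySem.Dict.nodup_keys_counter L) 0,
        PySem.Dict.keys_counter]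
      exact List.map_congr_left (fun k _ => PySem.Dict.getD_counter L k)
    set maxc := PySem.List.maxD ((PySem.Dict.counter L).values) (fun x => x) 0 with hmaxc
    have hvne : (PySem.Dict.counter L).values ≠ [] := by
      rw [hvals]; simpa using hK
    have hmax : ∀ e ∈ K, (List.count e L : Int) ≤ maxc := by
      intro e he
      exact le_maxD_self hvne _ (by rw [hvals]; exact List.mem_map_of_mem he)
    have hbucket : ∀ v, (K.foldl (fun b e => b.modify ((PySem.Dict.counter L).getD e 0) [] (fun l => l ++ [e])) PySem.Dict.empty).getD v []
        = K.filter (fun e => (List.count e L : Int) == v) := by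
      intro v
      rw [show K.foldl (fun b e => b.modify ((PySem.Dict.counter L).getD e 0) [] (fun l => l ++ [e])) PySem.Dict.empty
          = (K.map (fun e => ((PySem.Dict.counter L).getD e 0, e))).foldl (fun d p => d.modify p.1 [] (fun l => l ++ [p.2])) PySem.Dict.empty from by rw [List.foldl_map],
        PySem.Dict.getD_foldl_modify_append]
      simp [List.filter_map, Function.comp_def, PySem.Dict.getD_counter]
    rw [PySem.List.foldl_append_eq_flatMap]
    have hcov : ∀ e ∈ K, (List.count e L : Int) ∈ PySem.List.pyRange maxc 0 (-1) := by
      intro e he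
      rw [mem_pyRange_neg_one]
      refine ⟨?_, hmax e he⟩
      have : e ∈ L := (PySem.Set.mem_ofList L e).mp he
      exact_mod_cast List.count_pos_iff.mpr this
    rw [hkey, sorted_rev_eq_flatMap _ K _ (pairwise_pyRange_neg_one maxc) hcov]
    simp only [List.nil_append]
    exact (List.flatMap_congr (fun v _ => hbucket v)).symm
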